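-- pv_equiv track=rewrite | github.com/ssd-secure-disclosure/typhooncon2019 | TyphoonCon Challenge 2019/Peace-Maker/heapdump.py | find_largest_possible_size
-- ===== SOURCE A (Python) =====
-- def find_largest_possible_size(addr):
--     largest_possible_size = 0
--     for i in range(addr, 0, -1):
--         if addr % i != 0:
--             continue
--         sent_buf = addr // i
--         resulting_len = i % sent_buf
--         if resulting_len == i and resulting_len > largest_possible_size:
--             largest_possible_size = resulting_len
--     return largest_possible_size
-- ===== SOURCE B (Python) =====
-- def find_largest_possible_size(addr):
--     # Largest divisor i of addr with i < addr // i, found by scanning i upward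
--     # only while i*i < addr (O(sqrt(addr)) instead of A's O(addr) descent).
--     best = 0
--     i = 1
--     while i * i < addr:
--         if addr % i == 0:
--             best = i
--         i += 1
--     return best
-- ===== Notes on version B (the rewrite author's own statement) =====
-- stated objective: faster
-- what changed: A scans every candidate from addr downward testing divisibility plus a modular identity; B scans upward only while the candidate squared is below addr, keeping the last divisor found, which is exactly the largest divisor below sqrt(addr).
import Mathlib
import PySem

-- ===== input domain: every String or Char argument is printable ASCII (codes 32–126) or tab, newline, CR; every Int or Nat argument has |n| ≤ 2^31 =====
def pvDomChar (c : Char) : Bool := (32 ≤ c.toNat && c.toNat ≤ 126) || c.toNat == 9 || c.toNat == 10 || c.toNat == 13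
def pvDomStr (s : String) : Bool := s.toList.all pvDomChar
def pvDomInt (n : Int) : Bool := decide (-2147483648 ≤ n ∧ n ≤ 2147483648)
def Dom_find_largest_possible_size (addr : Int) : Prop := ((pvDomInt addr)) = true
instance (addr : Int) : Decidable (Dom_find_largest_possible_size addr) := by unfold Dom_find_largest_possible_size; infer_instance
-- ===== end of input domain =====

-- B replaces A's O(addr) descending scan by an ascending scan of the i with i*i < addr,
-- keeping the last divisor found (objective: faster, asymptotically).

-- ===== PORT A =====
-- loop body of A, kept as a helper (literal transliteration of the for-body)
def aStep (addr largest i : Int) : Int :=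
  if PySem.Int.mod addr i ≠ 0 then largest
  else
    let sent_buf := PySem.Int.floordiv addr i
    let resulting_len := PySem.Int.mod i sent_buf
    if resulting_len = i ∧ resulting_len > largest then resulting_len else largest

def find_largest_possible_size (addr : Int) : Int :=
  (PySem.List.pyRange addr 0 (-1)).foldl (aStep addr) 0

-- ===== PORT B =====
-- B's while-loop: scan i upward while i*i < addr, best := i whenever i divides addr
def altLoop (addr i best : Int) : Int :=
  if h : i * i < addr then
    altLoop addr (i + 1) (if PySem.Int.mod addr i = 0 then i else best)
  else best
termination_by (addr - i).toNat
decreasing_by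
  have h2 : i ≤ i * i := by nlinarith [sq_nonneg i, sq_nonneg (i - 1)]
  omega

def find_largest_possible_size_alt (addr : Int) : Int := altLoop addr 1 0

-- ===== PRECONDITION & SPEC =====
def Spec_find_largest_possible_size (addr : Int) (out : Int) : Prop := out = find_largest_possible_size_alt addr
instance (addr : Int) (out : Int) : Decidable (Spec_find_largest_possible_size addr out) := by unfold Spec_find_largest_possible_size; infer_instance

-- ===== CLAIM (what is proved, stated in full; the proofs are below) =====
def Claim_equal_find_largest_possible_size : Prop := ∀ (addr : Int), Dom_find_largest_possible_size addr → Spec_find_largest_possible_size addr (find_largest_possible_size addr)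

-- ===== LEMMAS AND PROOFS =====

-- the "contribution" of index i: i itself if i is a divisor below addr//i, else 0
def hfun (addr i : Int) : Int :=
  if PySem.Int.mod addr i = 0 ∧ i < PySem.Int.floordiv addr i then i else 0

-- simplified step: both loops amount to folding this over their index lists
def gStep (addr b i : Int) : Int := max b (hfun addr i)

-- if i divides addr (1 ≤ i), then i < addr//i ↔ i*i < addr
theorem div_lt_iff_sq (addr i : Int) (hi : 1 ≤ i) (hm : PySem.Int.mod addr i = 0) :
    i < PySem.Int.floordiv addr i ↔ i * i < addr := by
  have hb := PySem.Int.floordiv_mul_add_mod addr i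
  rw [hm, add_zero] at hb
  constructor
  · intro hlt
    calc i * i < PySem.Int.floordiv addr i * i :=
          mul_lt_mul_of_pos_right hlt (by omega)
      _ = addr := hb
  · intro hsq
    nlinarith [hb]

-- A's literal step equals the simplified step, for 1 ≤ i ≤ addr and 0 ≤ b
theorem aStep_eq_gStep (addr b i : Int) (hi : 1 ≤ i) (ha : i ≤ addr) (hb : 0 ≤ b) :
    aStep addr b i = gStep addr b i := by
  simp only [aStep, gStep, hfun]
  by_cases hm : PySem.Int.mod addr i = 0
  · have hspos : (1 : Int) ≤ PySem.Int.floordiv addr i :=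
      (PySem.Int.le_floordiv_iff_mul_le (show (0:Int) < i by omega)).mpr (by omega)
    have hmod : PySem.Int.mod i (PySem.Int.floordiv addr i) = i % PySem.Int.floordiv addr i :=
      PySem.Int.mod_eq_emod_of_pos (by omega)
    have hlow : 0 ≤ i % PySem.Int.floordiv addr i := Int.emod_nonneg i (by omega)
    have hup : i % PySem.Int.floordiv addr i < PySem.Int.floordiv addr i :=
      Int.emod_lt_of_pos i (by omega)
    have hiff : i % PySem.Int.floordiv addr i = i ↔ i < PySem.Int.floordiv addr i :=
      ⟨fun h => by omega, fun h => Int.emod_eq_of_lt (by omega) h⟩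
    rw [hmod]
    split_ifs <;> omega
  · split_ifs <;> omega

-- fold congruence: over a list of indices in [1, addr], A's fold is the simplified fold
theorem foldl_aStep_eq (addr : Int) (l : List Int)
    (hl : ∀ i ∈ l, 1 ≤ i ∧ i ≤ addr) :
    ∀ b, 0 ≤ b → l.foldl (aStep addr) b = l.foldl (gStep addr) b := by
  induction l with
  | nil => intro b _; rfl
  | cons x xs ih =>
    intro b hb
    have hx := hl x (by simp)
    simp only [List.foldl_cons]
    rw [aStep_eq_gStep addr b x hx.1 hx.2 hb]
    exact ih (fun i hi => hl i (by simp [hi])) _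
      (by simp only [gStep, hfun]; split_ifs <;> omega)

theorem foldl_gStep_max (addr : Int) (l : List Int) :
    ∀ b c, l.foldl (gStep addr) (max b c) = max (l.foldl (gStep addr) b) c := by
  induction l with
  | nil => intro b c; rfl
  | cons x xs ih =>
    intro b c
    simp only [List.foldl_cons]
    have h : gStep addr (max b c) x = max (gStep addr b x) c := by
      simp only [gStep]; omega
    rw [h, ih]

-- the simplified fold is reverse-invariant
theorem foldl_gStep_reverse (addr : Int) (l : List Int) (b : Int) :
    l.reverse.foldl (gStep addr) b = l.foldl (gStep addr) b := by
  rw [List.foldl_reverse]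
  induction l generalizing b with
  | nil => rfl
  | cons x xs ih =>
    simp only [List.foldr_cons, List.foldl_cons]
    rw [ih]
    show max (xs.foldl (gStep addr) b) (hfun addr x) = xs.foldl (gStep addr) (max b (hfun addr x))
    rw [foldl_gStep_max]

-- indices with i*i ≥ addr contribute nothing
theorem hfun_eq_zero (addr i : Int) (hi : 1 ≤ i) (hsq : ¬ i * i < addr) :
    hfun addr i = 0 := by
  unfold hfun
  split
  · next hc => exact absurd ((div_lt_iff_sq addr i hi hc.1).mp hc.2) hsq
  · rfl

theorem foldl_gStep_tail (addr : Int) (l : List Int)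
    (hl : ∀ i ∈ l, hfun addr i = 0) (b : Int) (hb : 0 ≤ b) :
    l.foldl (gStep addr) b = b := by
  induction l generalizing b with
  | nil => rfl
  | cons x xs ih =>
    simp only [List.foldl_cons]
    have hx := hl x (by simp)
    have h : gStep addr b x = b := by simp only [gStep, hx]; omega
    rw [h]
    exact ih (fun i hi => hl i (by simp [hi])) b hb

-- on indices the while-loop visits, the simplified step is B's update
theorem gStep_of_sq_lt (addr b i : Int) (hi : 1 ≤ i) (hbi : b < i) (hb : 0 ≤ b)
    (hsq : i * i < addr) :
    gStep addr b i = (if PySem.Int.mod addr i = 0 then i else b) := by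
  simp only [gStep, hfun]
  by_cases hm : PySem.Int.mod addr i = 0
  · have hlt := (div_lt_iff_sq addr i hi hm).mpr hsq
    simp only [hm, hlt, and_self, if_true]
    omega
  · split_ifs <;> omega

-- B's loop computes the simplified fold over the full ascending range
theorem altLoop_eq_foldl (addr : Int) :
    ∀ (n : Nat) (i b : Int), (addr - i).toNat = n → 1 ≤ i → 0 ≤ b → b < i →
    altLoop addr i b = (PySem.List.pyRange i (addr + 1) 1).foldl (gStep addr) b := by
  intro n
  induction n using Nat.strong_induction_on with
  | _ n ih =>
  intro i b hn hi hb hbi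
  rw [altLoop]
  by_cases hsq : i * i < addr
  · have hii : i ≤ i * i := by nlinarith
    rw [dif_pos hsq, PySem.List.pyRange_one_cons (by omega)]
    simp only [List.foldl_cons]
    rw [← gStep_of_sq_lt addr b i hi hbi hb hsq]
    exact ih ((addr - (i + 1)).toNat) (by omega) (i + 1) (gStep addr b i) rfl (by omega)
      (by simp only [gStep, hfun]; split_ifs <;> omega)
      (by simp only [gStep, hfun]; split_ifs <;> omega)
  · rw [dif_neg hsq]
    refine (foldl_gStep_tail addr _ ?_ b hb).symm
    intro j hj
    rw [PySem.List.mem_pyRange_one] at hj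
    exact hfun_eq_zero addr j (by omega) (by nlinarith [hj.1])

-- ===== VERDICT (by name: the statement is the Claim_ definition above) =====
theorem find_largest_possible_size_spec : Claim_equal_find_largest_possible_size := by
  intro addr _
  unfold Spec_find_largest_possible_size find_largest_possible_size find_largest_possible_size_alt
  rw [PySem.List.pyRange_neg_one_eq_reverse]
  simp only [zero_add]
  rw [foldl_aStep_eq addr _ ?mem 0 le_rfl]
  case mem =>
    intro i hi
    rw [List.mem_reverse, PySem.List.mem_pyRange_one] at hi
    omega
  rw [foldl_gStep_reverse]
  rw [altLoop_eq_foldl addr ((addr - 1).toNat) 1 0 rfl (by omega) le_rfl (by omega)]
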